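-- pv_equiv track=rewrite | github.com/BB31420/char_freq_anal | main.py | update_mapping
-- ===== SOURCE A (Python) =====
-- def get_next_likely_letter(freq_order, used_letters):
--     for letter in freq_order:
--         if letter not in used_letters:
--             return letter
--     return None  # This should never happen if freq_order contains all letters
--
-- def update_mapping(mapping, cipher_freq_order, english_freq_order):
--     used_plain = set(mapping.values())
--     for cipher_letter in cipher_freq_order:
--         if cipher_letter not in mapping:
--             next_plain = get_next_likely_letter(english_freq_order, used_plain)
--             if next_plain:
--                 mapping[cipher_letter] = next_plain
--                 used_plain.add(next_plain)
--     return mapping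
-- ===== SOURCE B (Python) =====
-- def update_mapping(mapping, cipher_freq_order, english_freq_order):
--     # One advancing iterator over english_freq_order: letters already used (or just
--     # assigned) are skipped and never rescanned.  Once no truthy unused letter is
--     # left, no further assignment can ever happen, so we stop.
--     used = set(mapping.values())
--     letters = iter(english_freq_order)
--     for c in cipher_freq_order:
--         if c in mapping:
--             continue
--         p = next((x for x in letters if x not in used), None)
--         if not p:
--             break
--         mapping[c] = p
--         used.add(p)
--     return mapping
-- ===== Notes on version B (the rewrite author's own statement) =====
-- stated objective: faster
-- what changed: A rescans english_freq_order from the start (via get_next_likely_letter) for every unmapped cipher letter; B consumes a single advancing iterator over english_freq_order, skipping used letters once and stopping when no truthy letter remains, so each english letter is examined at most once.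
import Mathlib
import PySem

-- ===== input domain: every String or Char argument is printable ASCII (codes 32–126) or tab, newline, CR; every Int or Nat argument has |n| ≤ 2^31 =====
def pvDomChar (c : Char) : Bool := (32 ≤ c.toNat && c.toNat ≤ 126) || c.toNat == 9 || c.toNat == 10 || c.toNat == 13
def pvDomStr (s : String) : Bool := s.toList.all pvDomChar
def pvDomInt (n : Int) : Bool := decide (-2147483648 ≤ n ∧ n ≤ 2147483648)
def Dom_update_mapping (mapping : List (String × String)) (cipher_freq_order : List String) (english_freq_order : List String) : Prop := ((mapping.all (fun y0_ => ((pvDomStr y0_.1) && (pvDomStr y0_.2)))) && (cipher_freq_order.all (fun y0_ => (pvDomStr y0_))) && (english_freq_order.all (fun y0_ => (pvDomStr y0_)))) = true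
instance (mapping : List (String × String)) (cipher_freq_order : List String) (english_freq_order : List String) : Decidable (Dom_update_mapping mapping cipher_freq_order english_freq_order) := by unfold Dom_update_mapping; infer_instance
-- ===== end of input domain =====

-- B replaces A's restart-from-the-front scan per cipher letter by one shared advancing
-- iterator over english_freq_order (each english letter examined at most once): faster.
-- A mutates `mapping` in place and returns it; B performs the same in-place mutation.

-- ===== PORT A =====
def get_next_likely_letter (freq_order : List String) (used_letters : PySem.Set String) : Option String :=
  match freq_order with
  | [] => none  -- loop fell through: return None
  | letter :: rest =>
    if ¬ (PySem.Set.contains used_letters letter) then some letter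
    else get_next_likely_letter rest used_letters

-- one iteration of A's `for cipher_letter in cipher_freq_order` body (state = (mapping, used_plain));
-- `if next_plain:` is Python truthiness: none and "" are falsy
def pvStepA (english_freq_order : List String)
    (st : PySem.Dict String String × PySem.Set String) (cipher_letter : String) :
    PySem.Dict String String × PySem.Set String :=
  if ¬ (st.1.contains cipher_letter) then
    match get_next_likely_letter english_freq_order st.2 with
    | some next_plain =>
        if next_plain ≠ "" then (st.1.insert cipher_letter next_plain, st.2.add next_plain)
        else st
    | none => st
  else st

def update_mapping (mapping : List (String × String)) (cipher_freq_order : List String) (english_freq_order : List String) : List (String × String) :=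
  let m : PySem.Dict String String := PySem.Dict.ofList mapping
  let used_plain : PySem.Set String := PySem.Set.ofList m.values
  (cipher_freq_order.foldl (pvStepA english_freq_order) (m, used_plain)).1.items

-- ===== PORT B =====
-- `next((x for x in letters if x not in used), None)`: first unused letter of the
-- iterator together with the iterator's remaining tail (none = iterator exhausted)
def pvNextUnused (letters : List String) (used : PySem.Set String) : Option (String × List String) :=
  match letters with
  | [] => none
  | x :: rest =>
    if PySem.Set.contains used x then pvNextUnused rest used else some (x, rest)

-- B's `for c in cipher_freq_order` loop; state = (mapping, used, remaining iterator)
def pvAssign (m : PySem.Dict String String) (used : PySem.Set String)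
    (letters : List String) : List String → PySem.Dict String String
  | [] => m
  | c :: cs =>
    if m.contains c then pvAssign m used letters cs
    else
      match pvNextUnused letters used with
      | none => m                                -- p = None: `if not p: break`
      | some (p, rest) =>
        if p = "" then m                         -- p falsy: `if not p: break`
        else pvAssign (m.insert c p) (used.add p) rest cs

def update_mapping_alt (mapping : List (String × String)) (cipher_freq_order : List String) (english_freq_order : List String) : List (String × String) :=
  let m : PySem.Dict String String := PySem.Dict.ofList mapping
  (pvAssign m (PySem.Set.ofList m.values) english_freq_order cipher_freq_order).items

-- ===== PRECONDITION & SPEC =====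
def Spec_update_mapping (mapping : List (String × String)) (cipher_freq_order : List String) (english_freq_order : List String) (out : List (String × String)) : Prop := out = update_mapping_alt mapping cipher_freq_order english_freq_order
instance (mapping : List (String × String)) (cipher_freq_order : List String) (english_freq_order : List String) (out : List (String × String)) : Decidable (Spec_update_mapping mapping cipher_freq_order english_freq_order out) := by unfold Spec_update_mapping; infer_instance

-- ===== CLAIM (what is proved, stated in full; the proofs are below) =====
def Claim_equal_update_mapping : Prop := ∀ (mapping : List (String × String)) (cipher_freq_order : List String) (english_freq_order : List String), Dom_update_mapping mapping cipher_freq_order english_freq_order → Spec_update_mapping mapping cipher_freq_order english_freq_order (update_mapping mapping cipher_freq_order english_freq_order)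

-- ===== LEMMAS AND PROOFS =====

-- once A's next letter is falsy (None or ""), A's state never changes again
theorem pv_stall (efo : List String) (m : PySem.Dict String String) (used : PySem.Set String)
    (h : get_next_likely_letter efo used = none ∨ get_next_likely_letter efo used = some "") :
    ∀ cs : List String, List.foldl (pvStepA efo) (m, used) cs = (m, used) := by
  intro cs
  induction cs with
  | nil => rfl
  | cons c cs ih =>
    have hstep : pvStepA efo (m, used) c = (m, used) := by
      unfold pvStepA
      rcases h with h | h <;> simp [h]
    simpa [List.foldl, hstep] using ih

-- a prefix made of used letters does not affect the scan
theorem pv_shift (pre eit : List String) (used : PySem.Set String)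
    (h : ∀ x ∈ pre, x ∈ used) :
    get_next_likely_letter (pre ++ eit) used = get_next_likely_letter eit used := by
  induction pre with
  | nil => rfl
  | cons x pre ih =>
    have hxc : PySem.Set.contains used x = true := by
      simpa [PySem.Set.contains] using h x (by simp)
    rw [List.cons_append]
    simp only [get_next_likely_letter, hxc, not_true_eq_false, if_false]
    exact ih (fun y hy => h y (by simp [hy]))

-- A's restarting scan and B's iterator step find the same letter
theorem pv_scan_eq (eit : List String) (used : PySem.Set String) :
    get_next_likely_letter eit used = (pvNextUnused eit used).map Prod.fst := by
  induction eit with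
  | nil => rfl
  | cons x rest ih =>
    by_cases hx : x ∈ used
    · simp [get_next_likely_letter, pvNextUnused, PySem.Set.contains, hx, ih]
    · simp [get_next_likely_letter, pvNextUnused, PySem.Set.contains, hx]

-- structure of a successful iterator step: a skipped all-used prefix, then the letter
theorem pv_next_decomp (eit : List String) (used : PySem.Set String) (p : String)
    (rest : List String) (h : pvNextUnused eit used = some (p, rest)) :
    ∃ sk, eit = sk ++ p :: rest ∧ (∀ x ∈ sk, x ∈ used) ∧ p ∉ used := by
  induction eit with
  | nil => simp [pvNextUnused] at h
  | cons x xs ih =>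
    by_cases hx : x ∈ used
    · obtain ⟨sk, h1, h2, h3⟩ := ih (by simpa [pvNextUnused, PySem.Set.contains, hx] using h)
      refine ⟨x :: sk, by simp [h1], ?_, h3⟩
      intro y hy
      rcases List.mem_cons.1 hy with rfl | hy
      exacts [hx, h2 y hy]
    · simp only [pvNextUnused, PySem.Set.contains, List.contains_iff_mem, hx] at h
      obtain ⟨rfl, rfl⟩ := h
      exact ⟨[], rfl, by simp, hx⟩

-- main invariant: A's fold over the remaining cipher letters, with the full english
-- list (= consumed prefix ++ remaining iterator), equals B's loop
theorem pv_main : ∀ (cs pre eit : List String) (m : PySem.Dict String String)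
    (used : PySem.Set String), (∀ x ∈ pre, x ∈ used) →
    (List.foldl (pvStepA (pre ++ eit)) (m, used) cs).1 = pvAssign m used eit cs := by
  intro cs
  induction cs with
  | nil => intro pre eit m used _; rfl
  | cons c cs ih =>
    intro pre eit m used hpre
    have hshift := pv_shift pre eit used hpre
    by_cases hc : m.contains c = true
    · have hstep : pvStepA (pre ++ eit) (m, used) c = (m, used) := by
        unfold pvStepA; simp [hc]
      rw [List.foldl, hstep, pvAssign, if_pos hc]
      exact ih pre eit m used hpre
    · rcases hnu : pvNextUnused eit used with _ | ⟨p, rest⟩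
      · have hg : get_next_likely_letter (pre ++ eit) used = none := by
          rw [hshift, pv_scan_eq, hnu]; rfl
        have hB : pvAssign m used eit (c :: cs) = m := by simp [pvAssign, hc, hnu]
        rw [hB, pv_stall (pre ++ eit) m used (Or.inl hg) (c :: cs)]
      · have hg : get_next_likely_letter (pre ++ eit) used = some p := by
          rw [hshift, pv_scan_eq, hnu]; rfl
        by_cases hp : p = ""
        · subst hp
          have hB : pvAssign m used eit (c :: cs) = m := by simp [pvAssign, hc, hnu]
          rw [hB, pv_stall (pre ++ eit) m used (Or.inr hg) (c :: cs)]
        · have hstep : pvStepA (pre ++ eit) (m, used) c = (m.insert c p, used.add p) := by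
            unfold pvStepA; simp [hc, hg, hp]
          have hB : pvAssign m used eit (c :: cs)
              = pvAssign (m.insert c p) (used.add p) rest cs := by
            simp [pvAssign, hc, hnu, hp]
          rw [hB, List.foldl, hstep]
          obtain ⟨sk, heit, hsk, -⟩ := pv_next_decomp eit used p rest hnu
          have happ : pre ++ eit = (pre ++ sk ++ [p]) ++ rest := by simp [heit]
          rw [happ]
          refine ih (pre ++ sk ++ [p]) rest (m.insert c p) (used.add p) ?_
          intro x hx
          rcases (by simpa using hx : x ∈ pre ∨ x ∈ sk ∨ x = p) with hx | hx | rfl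
          · exact (PySem.Set.mem_add used p x).2 (Or.inl (hpre x hx))
          · exact (PySem.Set.mem_add used p x).2 (Or.inl (hsk x hx))
          · exact (PySem.Set.mem_add used x x).2 (Or.inr rfl)

-- ===== VERDICT (by name: the statement is the Claim_ definition above) =====
theorem update_mapping_spec : Claim_equal_update_mapping := by
  intro mapping cfo efo _
  unfold Spec_update_mapping update_mapping update_mapping_alt
  have := pv_main cfo [] efo (PySem.Dict.ofList mapping)
    (PySem.Set.ofList (PySem.Dict.ofList mapping).values) (by simp)
  simpa using congrArg PySem.Dict.items this
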